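-- pv_equiv track=rewrite | github.com/emil-muller/CPR-wordlist-generator | cpr_calc.py | generate_control_numbers
-- ===== SOURCE A (Python) =====
-- def generate_control_numbers(datesum, gender=None):
--     """Generate a list of possible control numbers using the modulo 11 method.
--
--     https://da.wikipedia.org/wiki/CPR-nummer#Kontrol_af_personnummer
--
--     Keyword arguments:
--     datesum -- int -- the calculated checksum for the date
--     gender -- char -- the gender of the person which CPR-number should be generated for, possible options are 'm' and 'f'
--     """
--     increment = 2
--     if gender == "m":
--         start_pos = 1
--     elif gender == "f":
--         start_pos = 0
--     else:
--         # If no gender if passed generate CPR-number for both men and women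
--         increment = 1
--         start_pos = 0
--
--     checksum_coeff = [4, 3, 2, 1]
--     possible_control_numbers = []
--     for control_num in range(start_pos, 10000, increment):
--         controlsum = sum(
--             [
--                 int(x) * checksum_coeff[i]
--                 for i, x in enumerate("{:04d}".format(control_num))
--             ]
--         )
--         if (controlsum + datesum) % 11 == 0:
--             possible_control_numbers.append("{:04d}".format(control_num))
--     return possible_control_numbers
-- ===== SOURCE B (Python) =====
-- def generate_control_numbers(datesum, gender=None):
--     """Generate possible 4-digit control numbers (modulo 11 method).
--
--     Instead of scanning all 10000 candidates, iterate over the 1000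
--     three-digit prefixes and solve the checksum congruence for the
--     last digit directly.
--     """
--     result = []
--     for p in range(1000):
--         d0, rem = divmod(p, 100)
--         d1, d2 = divmod(rem, 10)
--         d3 = (-(datesum + 4 * d0 + 3 * d1 + 2 * d2)) % 11
--         if d3 <= 9:
--             if gender == "m":
--                 if d3 % 2 == 0:
--                     continue
--             elif gender == "f":
--                 if d3 % 2 == 1:
--                     continue
--             result.append("{:04d}".format(10 * p + d3))
--     return result
-- ===== Notes on version B (the rewrite author's own statement) =====
-- stated objective: faster
-- what changed: Instead of scanning all 10000 zero-padded candidate strings and re-parsing each one's digits, B iterates over the 1000 three-digit prefixes and solves the mod-11 checksum congruence for the last digit in closed form, skipping residue 10 and applying the gender parity to the solved digit.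
import Mathlib
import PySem

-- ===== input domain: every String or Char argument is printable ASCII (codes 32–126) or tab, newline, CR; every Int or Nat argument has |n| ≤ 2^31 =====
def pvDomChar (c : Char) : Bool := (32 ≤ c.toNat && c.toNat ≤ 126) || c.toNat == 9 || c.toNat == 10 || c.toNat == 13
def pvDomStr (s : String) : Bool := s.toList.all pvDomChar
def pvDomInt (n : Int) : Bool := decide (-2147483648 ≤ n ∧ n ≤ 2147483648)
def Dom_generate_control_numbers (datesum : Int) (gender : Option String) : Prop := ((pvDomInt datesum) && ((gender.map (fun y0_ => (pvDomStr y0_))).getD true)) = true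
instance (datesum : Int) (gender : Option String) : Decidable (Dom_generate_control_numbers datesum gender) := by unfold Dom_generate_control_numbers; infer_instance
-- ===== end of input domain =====

set_option maxRecDepth 6000

-- B replaces A's scan of all 10000 candidates (each one re-parsing its own zero-padded
-- string) by a loop over the 1000 three-digit prefixes that solves the mod-11 congruence
-- for the last digit directly (objective: faster, measured).

-- ===== PORT A =====

-- "{:04d}".format(n)  (= str(n).zfill(4), exact for every int; shared by both ports)
def pvFmt04 (n : Int) : String :=
  String.ofList (PySem.Chars.zfill (PySem.Int.toChars n) 4)

-- sum([int(x) * checksum_coeff[i] for i, x in enumerate("{:04d}".format(control_num))])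
-- (int(x) never fails: every formatted character is a digit; i < 4 always, so getD's default is dead)
def pvControlsum (control_num : Int) : Int :=
  ((PySem.List.enumerate (pvFmt04 control_num).toList).map
    (fun ix => ((PySem.Int.ofStr? (String.ofList [ix.2])).getD 0)
               * ((PySem.List.pyGet? ([4, 3, 2, 1] : List Int) ix.1).getD 0))).sum

def generate_control_numbers (datesum : Int) (gender : Option String) : List String :=
  let inc_start : Int × Int :=
    if gender = some "m" then (2, 1)
    else if gender = some "f" then (2, 0)
    else (1, 0)
  (PySem.List.pyRange inc_start.2 10000 inc_start.1).foldl
    (fun acc control_num =>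
      if PySem.Int.mod (pvControlsum control_num + datesum) 11 = 0 then
        acc ++ [pvFmt04 control_num]
      else acc) []

-- ===== PORT B =====
def generate_control_numbers_alt (datesum : Int) (gender : Option String) : List String :=
  (PySem.List.pyRange 0 1000 1).foldl
    (fun acc p =>
      let d0 := PySem.Int.floordiv p 100
      let rem := PySem.Int.mod p 100
      let d1 := PySem.Int.floordiv rem 10
      let d2 := PySem.Int.mod rem 10
      let d3 := PySem.Int.mod (-(datesum + 4 * d0 + 3 * d1 + 2 * d2)) 11
      if d3 ≤ 9 ∧
         (if gender = some "m" then PySem.Int.mod d3 2 = 1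
          else if gender = some "f" then PySem.Int.mod d3 2 = 0
          else True) then
        acc ++ [pvFmt04 (10 * p + d3)]
      else acc) []

-- B's inline last-digit expression

-- ===== PRECONDITION & SPEC =====
def Spec_generate_control_numbers (datesum : Int) (gender : Option String) (out : List String) : Prop := out = generate_control_numbers_alt datesum gender
instance (datesum : Int) (gender : Option String) (out : List String) : Decidable (Spec_generate_control_numbers datesum gender out) := by unfold Spec_generate_control_numbers; infer_instance

-- ===== CLAIM (what is proved, stated in full; the proofs are below) =====
def Claim_equal_generate_control_numbers : Prop := ∀ (datesum : Int) (gender : Option String), Dom_generate_control_numbers datesum gender → Spec_generate_control_numbers datesum gender (generate_control_numbers datesum gender)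

-- ===== LEMMAS AND PROOFS =====

-- the last digit B solves for, in clean Int.ediv/emod form
def pvD3 (ds p : Int) : Int :=
  (-(ds + 4 * (p / 100) + 3 * (p / 10 % 10) + 2 * (p % 10))) % 11

-- B's inline last-digit expression, as the port computes it
def pvRawD3 (ds p : Int) : Int :=
  PySem.Int.mod (-(ds + 4 * PySem.Int.floordiv p 100 + 3 * PySem.Int.floordiv (PySem.Int.mod p 100) 10
      + 2 * PySem.Int.mod (PySem.Int.mod p 100) 10)) 11

-- one unfolding of core's Nat.toDigitsCore at base 10
lemma tdc_step (f n : Nat) (l : List Char) :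
    Nat.toDigitsCore 10 (f + 1) n l =
      if n / 10 = 0 then Nat.digitChar (n % 10) :: l
      else Nat.toDigitsCore 10 f (n / 10) (Nat.digitChar (n % 10) :: l) := by
  simp [Nat.toDigitsCore]

lemma digitChar_not_sign (d : Nat) (h : d < 10) :
    ¬(Nat.digitChar d = '+' ∨ Nat.digitChar d = '-') := by
  interval_cases d <;> decide

lemma ofChars_digitChar (d : Nat) (h : d < 10) :
    PySem.Int.ofChars? [Nat.digitChar d] = some (d : Int) := by
  interval_cases d <;> decide

-- str(m) for m < 10000, digit by digit
lemma toDigits_eval (m : Nat) (h : m < 10000) :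
    Nat.toDigits 10 m =
      if m < 10 then [Nat.digitChar m]
      else if m < 100 then [Nat.digitChar (m / 10), Nat.digitChar (m % 10)]
      else if m < 1000 then [Nat.digitChar (m / 100), Nat.digitChar (m / 10 % 10), Nat.digitChar (m % 10)]
      else [Nat.digitChar (m / 1000), Nat.digitChar (m / 100 % 10), Nat.digitChar (m / 10 % 10), Nat.digitChar (m % 10)] := by
  unfold Nat.toDigits
  by_cases h1 : m < 10
  · rw [tdc_step]
    have e : m / 10 = 0 := by omega
    have e2 : m % 10 = m := by omega
    simp [e, e2, h1]
  · by_cases h2 : m < 100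
    · obtain ⟨f, hf⟩ : ∃ f, m + 1 = f + 1 + 1 := ⟨m - 1, by omega⟩
      rw [hf, tdc_step]
      have e : ¬ m / 10 = 0 := by omega
      rw [if_neg e, tdc_step]
      have e1 : m / 10 / 10 = 0 := by omega
      have e2 : m / 10 % 10 = m / 10 := by omega
      simp [e1, e2, h1, h2]
    · by_cases h3 : m < 1000
      · obtain ⟨f, hf⟩ : ∃ f, m + 1 = f + 1 + 1 + 1 := ⟨m - 2, by omega⟩
        rw [hf, tdc_step]
        rw [if_neg (by omega : ¬ m / 10 = 0), tdc_step]
        rw [if_neg (by omega : ¬ m / 10 / 10 = 0), tdc_step]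
        have e3 : m / 10 / 10 = m / 100 := by omega
        have e1 : m / 100 / 10 = 0 := by omega
        have e4 : m / 100 % 10 = m / 100 := by omega
        simp [e3, e1, e4, h1, h2, h3]
      · obtain ⟨f, hf⟩ : ∃ f, m + 1 = f + 1 + 1 + 1 + 1 := ⟨m - 3, by omega⟩
        rw [hf, tdc_step]
        rw [if_neg (by omega : ¬ m / 10 = 0), tdc_step]
        rw [if_neg (by omega : ¬ m / 10 / 10 = 0), tdc_step]
        rw [if_neg (by omega : ¬ m / 10 / 10 / 10 = 0), tdc_step]
        have e1 : m / 10 / 10 / 10 / 10 = 0 := by omega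
        have e2 : m / 10 / 10 / 10 % 10 = m / 1000 := by omega
        have e3 : m / 10 / 10 % 10 = m / 100 % 10 := by omega
        have e4 : m / 10 % 10 = m / 10 % 10 := rfl
        simp [e1, e2, e3, h1, h2, h3]

-- "{:04d}".format(m) for 0 <= m < 10000, digit by digit
lemma fmt_eq (m : Nat) (h : m < 10000) :
    (pvFmt04 (m : Int)).toList =
      [Nat.digitChar (m / 1000), Nat.digitChar (m / 100 % 10),
       Nat.digitChar (m / 10 % 10), Nat.digitChar (m % 10)] := by
  have hti : PySem.Int.toChars (m : Int) = Nat.toDigits 10 m := by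
    simp [PySem.Int.toChars]
  rw [pvFmt04, String.toList_ofList, hti, toDigits_eval m h]
  by_cases h1 : m < 10
  · have e0 : m / 1000 = 0 := by omega
    have e1 : m / 100 % 10 = 0 := by omega
    have e2 : m / 10 % 10 = 0 := by omega
    have e3 : m % 10 = m := by omega
    have hs := digitChar_not_sign m (by omega)
    simp only [if_pos h1, e0, e1, e2, e3]
    rw [PySem.Chars.zfill]
    simp [hs]
    decide
  · by_cases h2 : m < 100
    · have e0 : m / 1000 = 0 := by omega
      have e1 : m / 100 % 10 = 0 := by omega
      have e2 : m / 10 % 10 = m / 10 := by omega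
      have hs := digitChar_not_sign (m / 10) (by omega)
      simp only [if_neg h1, if_pos h2, e0, e1, e2]
      rw [PySem.Chars.zfill]
      simp [hs]
      decide
    · by_cases h3 : m < 1000
      · have e0 : m / 1000 = 0 := by omega
        have e1 : m / 100 % 10 = m / 100 := by omega
        have hs := digitChar_not_sign (m / 100) (by omega)
        simp only [if_neg h1, if_neg h2, if_pos h3, e0, e1]
        rw [PySem.Chars.zfill]
        simp [hs]
        decide
      · simp only [if_neg h1, if_neg h2, if_neg h3]
        rw [PySem.Chars.zfill]
        simp

-- A's string-derived checksum is the weighted digit sum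
lemma controlsum_eq (n : Int) (h0 : 0 ≤ n) (h1 : n < 10000) :
    pvControlsum n = 4 * (n / 1000) + 3 * (n / 100 % 10) + 2 * (n / 10 % 10) + n % 10 := by
  obtain ⟨m, rfl⟩ : ∃ m : Nat, n = (m : Int) := ⟨n.toNat, by omega⟩
  have hm : m < 10000 := by exact_mod_cast h1
  rw [pvControlsum, fmt_eq m hm]
  rw [PySem.List.enumerate_cons, PySem.List.enumerate_cons, PySem.List.enumerate_cons,
      PySem.List.enumerate_cons, PySem.List.enumerate_nil]
  norm_num
  rw [ofChars_digitChar _ (by omega), ofChars_digitChar _ (by omega),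
      ofChars_digitChar _ (by omega), ofChars_digitChar _ (by omega)]
  norm_num
  have g2 : ([4, 3, 2, 1] : List Int)[Int.toNat 2] = 2 := rfl
  have g3 : ([4, 3, 2, 1] : List Int)[Int.toNat 3] = 1 := rfl
  rw [g2, g3]
  omega

-- keeping every second offset of a range is halving it
lemma range_parity (a : Int) : ∀ (n : Nat),
    ((List.range n).map (fun k : Nat => a + (k : Int))).filter (fun x => decide (x % 2 = a % 2))
      = (List.range ((n + 1) / 2)).map (fun k : Nat => a + 2 * (k : Int))
  | 0 => by simp
  | 1 => by simp [List.range_one]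
  | (n + 2) => by
    have ih := range_parity a n
    have h1 : n + 2 = (n + 1) + 1 := rfl
    rw [h1, List.range_succ, List.range_succ]
    simp only [List.map_append, List.filter_append, ih]
    have hc : ((n + 1) + 1 + 1) / 2 = (n + 1) / 2 + 1 := by omega
    rw [hc, List.range_succ]
    by_cases hpar : n % 2 = 0
    · have e1 : ((a + (n : Int)) % 2 = a % 2) := by omega
      have e2 : ¬((a + ((n : Int) + 1)) % 2 = a % 2) := by omega
      have e3 : a + 2 * (((n + 1) / 2 : Nat) : Int) = a + (n : Int) := by
        have : ((n + 1) / 2 : Nat) = n / 2 := by omega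
        rw [this]; push_cast; omega
      simp [e1, e2, e3]
      omega
    · have e1 : ¬((a + (n : Int)) % 2 = a % 2) := by omega
      have e2 : ((a + ((n : Int) + 1)) % 2 = a % 2) := by omega
      have e3 : a + 2 * (((n + 1) / 2 : Nat) : Int) = a + ((n : Int) + 1) := by
        have h2 : ((n + 1) / 2 : Nat) = (n + 1) / 2 := rfl
        push_cast [Int.natCast_div]
        omega
      simp [e1, e2, e3]
      omega

-- a step-2 range is the parity filter of the step-1 range
lemma pyRange_two_filter (a : Int) (n : Nat) :
    PySem.List.pyRange a (a + n) 2
      = (PySem.List.pyRange a (a + n) 1).filter (fun x => decide (x % 2 = a % 2)) := by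
  rw [PySem.List.pyRange_of_pos _ _ (by norm_num : (0:Int) < 2), PySem.List.pyRange_one]
  have hn : (a + (n : Int) - a).toNat = n := by omega
  rw [hn, range_parity a n]
  have hc : (if a < a + (n : Int) then ((a + (n : Int) - a + 2 - 1) / 2).toNat else 0) = (n + 1) / 2 := by
    split_ifs with h <;> omega
  rw [hc]

-- an 'if P x: out.append(f x)' loop is filter-then-map
lemma foldl_append_ite2 {a b : Type} (P : a → Prop) [DecidablePred P] (f : a → b) :
    ∀ (l : List a) (acc : List b),
      l.foldl (fun acc x => if P x then acc ++ [f x] else acc) acc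
        = acc ++ (l.filter (fun x => decide (P x))).map f := by
  intro l
  induction l with
  | nil => simp
  | cons x xs ih =>
    intro acc
    by_cases h : P x <;> simp [h, ih, List.filter_cons]

lemma hok_par (c : Int) (r : Int) (h : 0 ≤ r) :
    decide (PySem.Int.mod r 2 = c) = decide (r % 2 = c) := by
  rw [PySem.Int.mod_eq_emod_of_pos (by norm_num : (0:Int) < 2)]

-- A's loop as filter-then-map

lemma par10 (p q : Int) : (10 * p + q) % 2 = q % 2 := by omega

-- one block of ten candidates contributes exactly the solved digit (when it is <= 9 and passes the parity test)
lemma block_eq (ds : Int) (okq : Int → Bool) (p : Int) (hp0 : 0 ≤ p) (hp1 : p < 1000) :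
    ((PySem.List.pyRange (10 * p) (10 * p + 10) 1).filter
        (fun n => decide (PySem.Int.mod (pvControlsum n + ds) 11 = 0) && okq (n % 2)))
      = if decide (pvD3 ds p ≤ 9) && okq (pvD3 ds p % 2) then [10 * p + pvD3 ds p] else [] := by
  have hr0 : 0 ≤ pvD3 ds p := Int.emod_nonneg _ (by norm_num)
  have hr1 : pvD3 ds p < 11 := Int.emod_lt_of_pos _ (by norm_num)
  have hcs : ∀ k : Nat, k ∈ List.range 10 →
      (decide (PySem.Int.mod (pvControlsum (10 * p + (k : Int)) + ds) 11 = 0)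
        && okq ((10 * p + (k : Int)) % 2))
      = (decide ((k : Int) = pvD3 ds p) && okq ((k : Int) % 2)) := by
    intro k hk
    have hk10 : k < 10 := List.mem_range.mp hk
    have hcond : PySem.Int.mod (pvControlsum (10 * p + (k : Int)) + ds) 11 = 0
        ↔ (k : Int) = pvD3 ds p := by
      rw [PySem.Int.mod_eq_emod_of_pos (by norm_num)]
      rw [controlsum_eq _ (by omega) (by omega)]
      unfold pvD3
      have d1 : (10 * p + (k : Int)) / 1000 = p / 100 := by omega
      have d2 : (10 * p + (k : Int)) / 100 % 10 = p / 10 % 10 := by omega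
      have d3 : (10 * p + (k : Int)) / 10 % 10 = p % 10 := by omega
      have d4 : (10 * p + (k : Int)) % 10 = (k : Int) := by omega
      rw [d1, d2, d3, d4]
      omega
    rw [par10]
    simp only [hcond]
  rw [PySem.List.pyRange_one]
  have h10 : (10 * p + 10 - 10 * p).toNat = 10 := by omega
  rw [h10, List.filter_map]
  simp only [Function.comp_def]
  rw [List.filter_congr hcs]
  set r := pvD3 ds p with hrdef
  clear_value r
  have hexp : List.range 10 = [0,1,2,3,4,5,6,7,8,9] := by decide
  rw [hexp]
  interval_cases r <;>
    simp only [List.filter, List.map] <;>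
    norm_num <;>
    (try (cases hok : okq 1 <;> simp [hok])) <;>
    (try (cases hok : okq 0 <;> simp [hok]))

-- the 10000-candidate filter, block by block, equals B's 1000-prefix filter
lemma main_core (ds : Int) (okq : Int → Bool) : ∀ (k : Nat), k ≤ 1000 →
    ((PySem.List.pyRange 0 (10 * (k : Int)) 1).filter
        (fun n => decide (PySem.Int.mod (pvControlsum n + ds) 11 = 0) && okq (n % 2))).map pvFmt04
      = ((PySem.List.pyRange 0 (k : Int) 1).filter
          (fun p => decide (pvD3 ds p ≤ 9) && okq (pvD3 ds p % 2))).map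
          (fun p => pvFmt04 (10 * p + pvD3 ds p)) := by
  intro k
  induction k with
  | zero => intro _; simp [PySem.List.pyRange_one_eq_nil]
  | succ k ih =>
    intro hk
    have hcast10 : 10 * (((k + 1 : Nat)) : Int) = 10 * (k : Int) + 10 := by push_cast; ring
    have hcast : (((k + 1 : Nat)) : Int) = (k : Int) + 1 := by push_cast; ring
    rw [hcast10, hcast]
    rw [PySem.List.pyRange_one_append 0 (10 * (k : Int)) (10 * (k : Int) + 10) (by positivity) (by omega)]
    rw [PySem.List.pyRange_one_succ_right (by positivity)]
    rw [List.filter_append, List.filter_append, List.map_append, List.map_append]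
    rw [ih (by omega)]
    congr 1
    rw [block_eq ds okq (k : Int) (by positivity) (by exact_mod_cast (by omega : (k:Int) < 1000))]
    cases hq : (decide (pvD3 ds (k : Int) ≤ 9) && okq (pvD3 ds (k : Int) % 2)) <;>
      simp [List.filter, hq]

lemma rawD3_eq (ds p : Int) (hp : 0 ≤ p) : pvRawD3 ds p = pvD3 ds p := by
  unfold pvRawD3 pvD3
  rw [PySem.Int.mod_eq_emod_of_pos (by norm_num : (0:Int) < 11),
      PySem.Int.mod_eq_emod_of_pos (by norm_num : (0:Int) < 100),
      PySem.Int.floordiv_eq_ediv_of_pos (by norm_num : (0:Int) < 100),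
      PySem.Int.floordiv_eq_ediv_of_pos (by norm_num : (0:Int) < 10),
      PySem.Int.mod_eq_emod_of_pos (by norm_num : (0:Int) < 10)]
  have h1 : (p % 100) / 10 = p / 10 % 10 := by omega
  have h2 : (p % 100) % 10 = p % 10 := by omega
  rw [h1, h2]

-- A's loop as filter-then-map
lemma A_foldl (ds s inc : Int) :
    (PySem.List.pyRange s 10000 inc).foldl
      (fun acc control_num =>
        if PySem.Int.mod (pvControlsum control_num + ds) 11 = 0 then
          acc ++ [pvFmt04 control_num]
        else acc) []
    = ((PySem.List.pyRange s 10000 inc).filter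
        (fun n => decide (PySem.Int.mod (pvControlsum n + ds) 11 = 0))).map pvFmt04 := by
  have h := foldl_append_ite2 (fun n => PySem.Int.mod (pvControlsum n + ds) 11 = 0) pvFmt04
    (PySem.List.pyRange s 10000 inc) []
  simpa using h

-- B's loop as filter-then-map (gender-specific parity condition pok on the solved digit)

-- B's filtered form with the inline digit expression replaced by pvD3
lemma B_clean (ds : Int) (okq : Int → Bool)
    (pok : Int → Prop) [DecidablePred pok]
    (hok : ∀ r : Int, 0 ≤ r → (decide (pok r) = okq (r % 2))) :
    ((PySem.List.pyRange 0 1000 1).filter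
        (fun p => decide (pvRawD3 ds p ≤ 9 ∧ pok (pvRawD3 ds p)))).map
        (fun p => pvFmt04 (10 * p + pvRawD3 ds p))
    = ((PySem.List.pyRange 0 1000 1).filter
          (fun p => decide (pvD3 ds p ≤ 9) && okq (pvD3 ds p % 2))).map
          (fun p => pvFmt04 (10 * p + pvD3 ds p)) := by
  have hmem : ∀ p : Int, p ∈ PySem.List.pyRange 0 1000 1 → 0 ≤ p := by
    intro p hp
    exact (PySem.List.mem_pyRange_one.mp hp).1
  rw [List.filter_congr (q := fun p => decide (pvD3 ds p ≤ 9) && okq (pvD3 ds p % 2)) (fun p hp => by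
    have h0 := hmem p hp
    have hr0 : 0 ≤ pvD3 ds p := Int.emod_nonneg _ (by norm_num)
    simp only [Bool.decide_and, rawD3_eq ds p h0, hok _ hr0])]
  apply List.map_congr_left
  intro p hp
  rw [rawD3_eq ds p (hmem p (List.mem_of_mem_filter hp))]

-- gender neither 'm' nor 'f': both programs take their default branch
lemma case_generic (ds : Int) (g : Option String) (hm : g ≠ some "m") (hf : g ≠ some "f") :
    generate_control_numbers ds g = generate_control_numbers_alt ds g := by
  have hA : generate_control_numbers ds g =
      ((PySem.List.pyRange 0 10000 1).filter
        (fun n => decide (PySem.Int.mod (pvControlsum n + ds) 11 = 0))).map pvFmt04 := by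
    unfold generate_control_numbers
    simp only [hm, hf, if_neg, if_false]
    exact A_foldl ds 0 1
  have hB : generate_control_numbers_alt ds g =
      ((PySem.List.pyRange 0 1000 1).filter
        (fun p => decide (pvRawD3 ds p ≤ 9 ∧ True))).map
        (fun p => pvFmt04 (10 * p + pvRawD3 ds p)) := by
    unfold generate_control_numbers_alt
    simp only [hm, hf, if_neg, if_false]
    exact foldl_append_ite2 (fun p => pvRawD3 ds p ≤ 9 ∧ True)
      (fun p => pvFmt04 (10 * p + pvRawD3 ds p)) _ []
  rw [hA, hB, B_clean ds (fun _ => true) (fun _ => True) (fun r _ => by simp)]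
  have mc := main_core ds (fun _ => true) 1000 (le_refl _)
  simp only [Nat.cast_ofNat, Bool.and_true] at mc
  have e : (10 : ℤ) * 1000 = 10000 := by norm_num
  rw [e] at mc
  simpa using mc

lemma case_m (ds : Int) :
    generate_control_numbers ds (some "m") = generate_control_numbers_alt ds (some "m") := by
  have hA : generate_control_numbers ds (some "m") =
      ((PySem.List.pyRange 1 10000 2).filter
        (fun n => decide (PySem.Int.mod (pvControlsum n + ds) 11 = 0))).map pvFmt04 :=
    A_foldl ds 1 2
  have hB : generate_control_numbers_alt ds (some "m") =
      ((PySem.List.pyRange 0 1000 1).filter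
        (fun p => decide (pvRawD3 ds p ≤ 9 ∧ PySem.Int.mod (pvRawD3 ds p) 2 = 1))).map
        (fun p => pvFmt04 (10 * p + pvRawD3 ds p)) := by
    unfold generate_control_numbers_alt
    simp only [reduceIte]
    exact foldl_append_ite2 (fun p => pvRawD3 ds p ≤ 9 ∧ PySem.Int.mod (pvRawD3 ds p) 2 = 1)
      (fun p => pvFmt04 (10 * p + pvRawD3 ds p)) _ []
  rw [hA, hB, B_clean ds (fun q => decide (q = 1)) (fun r => PySem.Int.mod r 2 = 1)
    (fun r h => hok_par 1 r h)]
  have h2 : PySem.List.pyRange 1 10000 2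
      = (PySem.List.pyRange 1 10000 1).filter (fun x => decide (x % 2 = 1)) := by
    have h := pyRange_two_filter 1 9999
    simp only [Nat.cast_ofNat] at h
    have e1 : (1 : Int) + 9999 = 10000 := by norm_num
    have e12 : (1 : Int) % 2 = 1 := rfl
    simp only [e1, e12] at h
    exact h
  rw [h2, List.filter_filter]
  have mc := main_core ds (fun q => decide (q = 1)) 1000 (le_refl _)
  simp only [Nat.cast_ofNat] at mc
  have e : (10 : ℤ) * 1000 = 10000 := by norm_num
  rw [e] at mc
  rw [PySem.List.pyRange_one_cons (by norm_num : (0:Int) < 10000), List.filter_cons] at mc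
  have hz : (decide ((0:Int) % 2 = 1)) = false := rfl
  simp only [hz, Bool.and_false, Bool.false_eq_true, if_false, zero_add] at mc
  rw [← mc]

lemma case_f (ds : Int) :
    generate_control_numbers ds (some "f") = generate_control_numbers_alt ds (some "f") := by
  have hA : generate_control_numbers ds (some "f") =
      ((PySem.List.pyRange 0 10000 2).filter
        (fun n => decide (PySem.Int.mod (pvControlsum n + ds) 11 = 0))).map pvFmt04 :=
    A_foldl ds 0 2
  have hB : generate_control_numbers_alt ds (some "f") =
      ((PySem.List.pyRange 0 1000 1).filter
        (fun p => decide (pvRawD3 ds p ≤ 9 ∧ PySem.Int.mod (pvRawD3 ds p) 2 = 0))).map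
        (fun p => pvFmt04 (10 * p + pvRawD3 ds p)) := by
    unfold generate_control_numbers_alt
    simp only [reduceIte]
    exact foldl_append_ite2 (fun p => pvRawD3 ds p ≤ 9 ∧ PySem.Int.mod (pvRawD3 ds p) 2 = 0)
      (fun p => pvFmt04 (10 * p + pvRawD3 ds p)) _ []
  rw [hA, hB, B_clean ds (fun q => decide (q = 0)) (fun r => PySem.Int.mod r 2 = 0)
    (fun r h => hok_par 0 r h)]
  have h2 : PySem.List.pyRange 0 10000 2
      = (PySem.List.pyRange 0 10000 1).filter (fun x => decide (x % 2 = 0)) := by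
    have h := pyRange_two_filter 0 10000
    simp only [Nat.cast_ofNat, zero_add] at h
    have e02 : (0 : Int) % 2 = 0 := rfl
    simp only [e02] at h
    exact h
  rw [h2, List.filter_filter]
  have mc := main_core ds (fun q => decide (q = 0)) 1000 (le_refl _)
  simp only [Nat.cast_ofNat] at mc
  have e : (10 : ℤ) * 1000 = 10000 := by norm_num
  rw [e] at mc
  rw [← mc]


theorem final (ds : Int) (g : Option String) :
    generate_control_numbers ds g = generate_control_numbers_alt ds g := by
  rcases g with _ | s
  · exact case_generic ds none (by simp) (by simp)
  · by_cases hsm : s = "m"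
    · subst hsm; exact case_m ds
    · by_cases hsf : s = "f"
      · subst hsf; exact case_f ds
      · exact case_generic ds (some s) (by simp [hsm]) (by simp [hsf])

-- ===== VERDICT (by name: the statement is the Claim_ definition above) =====
theorem generate_control_numbers_spec : Claim_equal_generate_control_numbers := by
  intro datesum gender _
  show generate_control_numbers datesum gender = generate_control_numbers_alt datesum gender
  exact final datesum gender
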